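-- pv_equiv track=rewrite | github.com/arshad2002/competitive_programming | Number_of_Ways_to_Split_Array.py | waysToSplitArray
-- ===== SOURCE A (Python) =====
-- def waysToSplitArray(nums):
--     n = len(nums)
--     prefix_sum = [0] * (n+1)
--     count = 0
--     for i in range(n):
--         prefix_sum[i+1] =prefix_sum[i]+nums[i]
--
--     for i in range(n-1):
--         last_digits_sum = prefix_sum[n] - prefix_sum[i+1]
--         if prefix_sum[i+1]>=last_digits_sum:
--             count+=1
--     return count
-- ===== SOURCE B (Python) =====
-- def waysToSplitArray(nums):
--     total = sum(nums)
--     right = 0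
--     count = 0
--     for x in reversed(nums[1:]):
--         right += x
--         if 2 * right <= total:
--             count += 1
--     return count
-- ===== Notes on version B (the rewrite author's own statement) =====
-- stated objective: alternative
-- what changed: B scans the array backwards over the tail maintaining a right-suffix-sum accumulator and tests the algebraically rewritten condition 2*right <= total, instead of A's forward pass that first materializes an (n+1)-entry prefix-sum table and then compares each prefix against total minus prefix.
import Mathlib
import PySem

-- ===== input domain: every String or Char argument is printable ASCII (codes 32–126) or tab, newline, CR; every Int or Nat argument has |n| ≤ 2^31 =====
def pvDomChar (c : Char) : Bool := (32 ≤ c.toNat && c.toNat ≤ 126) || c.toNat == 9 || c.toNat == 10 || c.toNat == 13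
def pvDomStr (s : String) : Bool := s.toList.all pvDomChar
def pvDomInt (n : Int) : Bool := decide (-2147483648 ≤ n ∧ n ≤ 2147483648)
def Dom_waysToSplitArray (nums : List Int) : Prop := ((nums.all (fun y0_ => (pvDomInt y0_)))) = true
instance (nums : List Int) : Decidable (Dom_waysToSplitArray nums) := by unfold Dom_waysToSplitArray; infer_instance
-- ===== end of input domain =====

-- B scans the array backwards over the tail with a right-suffix-sum accumulator and the
-- rewritten test 2*right <= total, instead of A's forward pass over a prebuilt prefix-sum table.

-- ===== PORT A =====
-- A fills prefix_sum left to right, each cell from the previous one; ported as the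
-- structural recursion producing exactly those cells in order.
def pvPrefix : List Int → Int → List Int
  | [], acc => [acc]
  | x :: xs, acc => acc :: pvPrefix xs (acc + x)

def waysToSplitArray (nums : List Int) : Int :=
  let n := nums.length
  let prefix_sum := pvPrefix nums 0
  (List.range (n - 1)).foldl
    (fun count i =>
      let last_digits_sum := prefix_sum.getD n 0 - prefix_sum.getD (i + 1) 0
      if prefix_sum.getD (i + 1) 0 ≥ last_digits_sum then count + 1 else count)
    0

-- ===== PORT B =====
-- reversed(nums[1:]) is ported as (nums.drop 1).reverse (exact for this nonnegative slice).
def waysToSplitArray_alt (nums : List Int) : Int :=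
  let total := nums.sum
  (((nums.drop 1).reverse).foldl
    (fun (st : Int × Int) x =>
      let right := st.1 + x
      (right, if 2 * right ≤ total then st.2 + 1 else st.2))
    (0, 0)).2

-- ===== PRECONDITION & SPEC =====
def Spec_waysToSplitArray (nums : List Int) (out : Int) : Prop := out = waysToSplitArray_alt nums
instance (nums : List Int) (out : Int) : Decidable (Spec_waysToSplitArray nums out) := by unfold Spec_waysToSplitArray; infer_instance

-- ===== CLAIM (what is proved, stated in full; the proofs are below) =====
def Claim_equal_waysToSplitArray : Prop := ∀ (nums : List Int), Dom_waysToSplitArray nums → Spec_waysToSplitArray nums (waysToSplitArray nums)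

-- ===== LEMMAS AND PROOFS =====

theorem pvPrefix_getD (xs : List Int) (acc : Int) (i : Nat) (h : i ≤ xs.length) :
    (pvPrefix xs acc).getD i 0 = acc + (xs.take i).sum := by
  induction xs generalizing acc i with
  | nil =>
    have : i = 0 := Nat.le_zero.mp (by simpa using h)
    subst this; simp [pvPrefix]
  | cons x xs ih =>
    cases i with
    | zero => simp [pvPrefix]
    | succ j =>
      simp only [pvPrefix, List.getD_cons_succ, List.take_succ_cons, List.sum_cons]
      rw [ih _ _ (by simpa using h)]
      ring

-- A's counting loop adds 1 exactly on the indices satisfying its test.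
theorem foldl_count_eq (l : List Nat) (p : Nat → Prop) [DecidablePred p] (c : Int) :
    l.foldl (fun count i => if p i then count + 1 else count) c
      = c + (l.countP (fun i => decide (p i)) : Int) := by
  induction l generalizing c with
  | nil => simp
  | cons x xs ih =>
    simp only [List.foldl_cons, ih, List.countP_cons]
    by_cases hx : p x <;> simp [hx] <;> push_cast <;> try ring_nf

-- B's backward loop: the accumulator is the running suffix sum; the counter counts the
-- traversal prefixes whose accumulated sum passes the test.
theorem foldB_eq (total : Int) (ys : List Int) (r c : Int) :
    (ys.foldl
      (fun (st : Int × Int) x =>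
        let right := st.1 + x
        (right, if 2 * right ≤ total then st.2 + 1 else st.2))
      (r, c))
    = (r + ys.sum,
       c + ((List.range ys.length).countP
              (fun k => decide (2 * (r + (ys.take (k + 1)).sum) ≤ total)) : Int)) := by
  induction ys generalizing r c with
  | nil => simp
  | cons y ys ih =>
    simp only [List.foldl_cons]
    rw [ih]
    have hc : (List.range (y :: ys).length).countP
          (fun k => decide (2 * (r + ((y :: ys).take (k + 1)).sum) ≤ total))
        = ((if 2 * (r + y) ≤ total then 1 else 0) : Nat)
          + (List.range ys.length).countP
              (fun k => decide (2 * (r + y + (ys.take (k + 1)).sum) ≤ total)) := by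
      rw [List.length_cons, List.range_succ_eq_map, List.countP_cons, List.countP_map]
      have hf : ((fun k => decide (2 * (r + ((y :: ys).take (k + 1)).sum) ≤ total)) ∘ Nat.succ)
          = fun k => decide (2 * (r + y + (ys.take (k + 1)).sum) ≤ total) := by
        funext k
        simp only [Function.comp, List.take_succ_cons, List.sum_cons]
        rw [decide_eq_decide]
        constructor <;> intro h <;> linarith
      rw [hf]
      simp only [List.take_succ_cons, List.take_zero, List.sum_cons, List.sum_nil, add_zero,
        decide_eq_true_eq]
      omega
    rw [hc]
    simp only [List.sum_cons, Prod.mk.injEq]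
    refine ⟨by ring, ?_⟩
    split_ifs with h <;> push_cast <;> ring

-- counting over range m is invariant under the index reversal k ↦ m - 1 - k
theorem countP_range_reverse (m : Nat) (p : Nat → Bool) :
    (List.range m).countP p = (List.range m).countP (fun k => p (m - 1 - k)) := by
  induction m generalizing p with
  | zero => simp
  | succ m ih =>
    conv_lhs => rw [List.range_succ]
    conv_rhs => rw [List.range_succ_eq_map]
    simp only [List.countP_append, List.countP_cons, List.countP_map, List.countP_nil]
    have hf : ((fun k => p (m + 1 - 1 - k)) ∘ Nat.succ) = fun k => p (m - 1 - k) := by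
      funext k; simp only [Function.comp_apply]; congr 1; omega
    rw [hf, ← ih p]
    have h0 : m + 1 - 1 - 0 = m := by omega
    rw [h0]
    omega

-- the (n-1-i)-long suffix sum is total minus the (i+1)-long prefix sum
theorem suffix_sum_eq (nums : List Int) (i : Nat) (hi : i < nums.length - 1) :
    (((nums.drop 1).reverse).take (nums.length - 1 - i)).sum
      = nums.sum - (nums.take (i + 1)).sum := by
  rw [List.take_reverse, List.sum_reverse, List.drop_drop]
  have h1 : (nums.drop 1).length = nums.length - 1 := by simp
  have h3 : 1 + ((nums.drop 1).length - (nums.length - 1 - i)) = i + 1 := by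
    rw [h1]; omega
  rw [h3]
  have := List.sum_take_add_sum_drop nums (i + 1)
  linarith

-- ===== VERDICT (by name: the statement is the Claim_ definition above) =====
theorem waysToSplitArray_spec : Claim_equal_waysToSplitArray := by
  intro nums _
  unfold Spec_waysToSplitArray waysToSplitArray waysToSplitArray_alt
  dsimp only
  rw [foldl_count_eq, foldB_eq]
  dsimp only
  congr 1
  congr 1
  have hlen : ((nums.drop 1).reverse).length = nums.length - 1 := by simp
  rw [hlen]
  rw [countP_range_reverse (nums.length - 1)
    (fun k => decide (2 * (0 + (((nums.drop 1).reverse).take (k + 1)).sum) ≤ nums.sum))]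
  apply List.countP_congr
  intro i hi
  have hi' : i < nums.length - 1 := List.mem_range.mp hi
  simp only [decide_eq_true_eq, zero_add]
  have hk1 : nums.length - 1 - 1 - i + 1 = nums.length - 1 - i := by omega
  rw [hk1, suffix_sum_eq nums i hi']
  have hp : (pvPrefix nums 0).getD (i + 1) 0 = (nums.take (i + 1)).sum := by
    rw [pvPrefix_getD nums 0 (i + 1) (by omega)]; ring
  have ht : (pvPrefix nums 0).getD nums.length 0 = nums.sum := by
    rw [pvPrefix_getD nums 0 nums.length le_rfl]; simp
  rw [hp, ht]
  constructor <;> intro h <;> linarith
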